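-- pv_equiv track=rewrite | github.com/kieranroberts/wordle | solution2.py | modify_dict_upto_key
-- ===== SOURCE A (Python) =====
-- def modify_dict_upto_key(my_dict, key):
--     remove_keys = list()
--     for k, v in my_dict.items():
--         if k != "least":
--             remove_keys.append(k)
--         elif k == "least":
--             remove_keys.append(k)
--             break
--     for k in remove_keys:
--         my_dict.pop(k)
--     return my_dict
-- ===== SOURCE B (Python) =====
-- def modify_dict_upto_key(my_dict, key):
--     kept = []
--     for k, v in reversed(list(my_dict.items())):
--         if k == "least":
--             break
--         kept.append((k, v))
--     else:
--         kept = []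
--     my_dict.clear()
--     my_dict.update(reversed(kept))
--     return my_dict
-- ===== Notes on version B (the rewrite author's own statement) =====
-- stated objective: alternative
-- what changed: B scans the items in reverse collecting the entries AFTER 'least' (a for-else yields the empty list when 'least' is absent), then clears the dict and rebuilds it from that kept suffix, instead of A's forward scan-with-break that builds a removal list and pops each key.
import Mathlib
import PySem

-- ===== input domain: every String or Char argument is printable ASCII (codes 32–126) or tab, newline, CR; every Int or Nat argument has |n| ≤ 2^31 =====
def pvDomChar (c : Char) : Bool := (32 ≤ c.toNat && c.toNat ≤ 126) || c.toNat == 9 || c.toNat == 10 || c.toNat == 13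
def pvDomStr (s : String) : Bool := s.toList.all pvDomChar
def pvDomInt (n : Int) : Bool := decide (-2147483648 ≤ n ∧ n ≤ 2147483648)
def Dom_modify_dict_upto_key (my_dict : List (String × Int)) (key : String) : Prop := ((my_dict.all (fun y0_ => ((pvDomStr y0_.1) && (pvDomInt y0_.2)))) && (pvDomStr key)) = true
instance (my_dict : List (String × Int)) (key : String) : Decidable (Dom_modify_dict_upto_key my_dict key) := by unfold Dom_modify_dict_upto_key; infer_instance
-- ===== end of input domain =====

-- B scans the items in reverse, keeping the suffix of entries after "least" (for-else gives
-- [] when "least" is absent), then clears the dict and rebuilds it from that kept suffix,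
-- instead of A's forward scan-with-break building a removal list and popping each key.
-- In Python both mutate the argument dict in place; the equivalence is about the returned contents.

-- ===== PORT A =====
-- the first loop of A: collect keys, stopping after (and including) the first "least"
def pvRemoveKeysA : List (String × Int) → List String
  | [] => []
  | (k, _) :: rest =>
      if k ≠ "least" then k :: pvRemoveKeysA rest
      else [k]          -- elif k == "least": append k, then break

def modify_dict_upto_key (my_dict : List (String × Int)) (key : String) : List (String × Int) :=
  let d := PySem.Dict.ofList my_dict
  let remove_keys := pvRemoveKeysA d.items
  -- for k in remove_keys: my_dict.pop(k)   (the `none` branch of pop? is unreachable: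
  -- every k in remove_keys is a key of d, so Python's pop never raises here)
  (remove_keys.foldl (fun d k => match d.pop? k with | some (_, d') => d' | none => d) d).items

-- ===== PORT B =====
-- the reverse loop of B: walk the reversed items appending entries to `kept` until "least"
-- is hit (`some kept`); `none` = the loop ran to completion (Python's for-else resets kept to [])
def pvKeptB : List (String × Int) → List (String × Int) → Option (List (String × Int))
  | _,   [] => none
  | acc, (k, v) :: rest => if k = "least" then some acc else pvKeptB (acc ++ [(k, v)]) rest

def modify_dict_upto_key_alt (my_dict : List (String × Int)) (key : String) : List (String × Int) :=
  let d := PySem.Dict.ofList my_dict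
  let kept := (pvKeptB [] d.items.reverse).getD []       -- for … else: kept = []
  -- my_dict.clear(); my_dict.update(reversed(kept))
  (PySem.Dict.empty.update kept.reverse).items

-- ===== PRECONDITION & SPEC =====
def Spec_modify_dict_upto_key (my_dict : List (String × Int)) (key : String) (out : List (String × Int)) : Prop := out = modify_dict_upto_key_alt my_dict key
instance (my_dict : List (String × Int)) (key : String) (out : List (String × Int)) : Decidable (Spec_modify_dict_upto_key my_dict key out) := by unfold Spec_modify_dict_upto_key; infer_instance

-- ===== CLAIM (what is proved, stated in full; the proofs are below) =====
def Claim_equal_modify_dict_upto_key : Prop := ∀ (my_dict : List (String × Int)) (key : String), Dom_modify_dict_upto_key my_dict key → Spec_modify_dict_upto_key my_dict key (modify_dict_upto_key my_dict key)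

-- ===== LEMMAS AND PROOFS =====

-- A's pop-with-discard step is exactly erase (erase is a no-op on a missing key)
theorem pv_step_eq_erase (d : PySem.Dict String Int) (k : String) :
    (match d.pop? k with | some (_, d') => d' | none => d) = d.erase k := by
  cases h : d.get? k with
  | some v => simp [PySem.Dict.pop?, h]
  | none =>
    simp only [PySem.Dict.pop?, h, Option.map_none]
    apply PySem.Dict.ext
    unfold PySem.Dict.erase
    have hk : k ∉ d.keys := by
      rw [← PySem.Dict.get?_eq_none_iff_not_mem_keys]; exact h
    rw [eq_comm, List.filter_eq_self]
    intro p hp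
    have hmem : p.1 ∈ d.keys := List.mem_map_of_mem hp
    have hne : p.1 ≠ k := fun he => hk (he ▸ hmem)
    simp [hne]

-- B's reverse loop runs to completion (for-else) exactly when "least" is absent
theorem pvKeptB_of_not_mem (xs : List (String × Int)) (h : "least" ∉ xs.map Prod.fst) :
    ∀ acc, pvKeptB acc xs = none := by
  induction xs with
  | nil => intro acc; rfl
  | cons p rest ih =>
    intro acc
    obtain ⟨k, v⟩ := p
    simp only [List.map_cons, List.mem_cons, not_or] at h
    have hne : ¬ k = "least" := fun he => h.1 he.symm
    simp only [pvKeptB, if_neg hne]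
    exact ih h.2 _

-- B's reverse loop breaks inside xs when "least" occurs in xs: a trailing ys is never reached
theorem pvKeptB_append_of_mem (ys : List (String × Int)) :
    ∀ (xs : List (String × Int)) acc, "least" ∈ xs.map Prod.fst →
      pvKeptB acc (xs ++ ys) = pvKeptB acc xs := by
  intro xs
  induction xs with
  | nil => intro acc h; simp at h
  | cons p rest ih =>
    intro acc h
    obtain ⟨k, v⟩ := p
    by_cases hk : k = "least"
    · simp [pvKeptB, hk]
    · simp only [List.map_cons, List.mem_cons] at h
      rcases h with h | h
      · exact absurd h.symm hk
      · simp only [List.cons_append, pvKeptB, if_neg hk]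
        exact ih _ h

-- B's reverse loop just accumulates a "least"-free prefix
theorem pvKeptB_append_of_not_mem (ys : List (String × Int)) :
    ∀ (xs : List (String × Int)) acc, "least" ∉ xs.map Prod.fst →
      pvKeptB acc (xs ++ ys) = pvKeptB (acc ++ xs) ys := by
  intro xs
  induction xs with
  | nil => intro acc _; simp
  | cons p rest ih =>
    intro acc h
    obtain ⟨k, v⟩ := p
    simp only [List.map_cons, List.mem_cons, not_or] at h
    have hne : ¬ k = "least" := fun he => h.1 he.symm
    simp only [List.cons_append, pvKeptB, if_neg hne]
    rw [ih _ h.2]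
    simp

-- erasing the head key of a key-Nodup items list just drops the head
theorem pv_erase_mk_cons (k : String) (v : Int) (rest : List (String × Int))
    (h : k ∉ rest.map Prod.fst) :
    (PySem.Dict.mk ((k, v) :: rest) : PySem.Dict String Int).erase k = PySem.Dict.mk rest := by
  apply PySem.Dict.ext
  unfold PySem.Dict.erase
  simp only [List.filter_cons]
  rw [if_neg (by simp)]
  show List.filter _ rest = rest
  rw [List.filter_eq_self]
  intro p hp
  have : p.1 ≠ k := fun he => h (he ▸ List.mem_map_of_mem hp)
  simp [this]

-- rebuilding an (empty-cleared) dict from a key-Nodup entry list reproduces exactly that list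
theorem pv_update_empty (l : List (String × Int)) (h : (l.map Prod.fst).Nodup) :
    ((PySem.Dict.empty : PySem.Dict String Int).update l).items = l := by
  unfold PySem.Dict.update
  rw [PySem.Dict.items_foldl_insert_fresh l Prod.fst Prod.snd PySem.Dict.empty
      (fun a _ => PySem.Dict.contains_empty a.1) h]
  simp [PySem.Dict.empty]

-- the central equation: on any items list with distinct keys, A's erase loop over its
-- collected removal keys returns the same entries as B's rebuilt kept suffix
theorem pv_main (l : List (String × Int)) (hnd : (l.map Prod.fst).Nodup) :
    ((pvRemoveKeysA l).foldl (fun d k => d.erase k) (PySem.Dict.mk l)).items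
      = ((PySem.Dict.empty : PySem.Dict String Int).update
          ((pvKeptB [] l.reverse).getD []).reverse).items := by
  induction l with
  | nil => rfl
  | cons p rest ih =>
    obtain ⟨k, v⟩ := p
    simp only [List.map_cons, List.nodup_cons] at hnd
    by_cases hk : k = "least"
    · subst hk
      -- A removes just the head; B keeps everything after it (= rest, reversed twice)
      have hA : pvRemoveKeysA (("least", v) :: rest) = ["least"] := by simp [pvRemoveKeysA]
      have hB : pvKeptB [] ((("least", v) :: rest).reverse)
          = some rest.reverse := by
        rw [List.reverse_cons,
            pvKeptB_append_of_not_mem _ _ _ (by simpa using hnd.1)]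
        simp [pvKeptB]
      rw [hA, hB]
      simp only [List.foldl_cons, List.foldl_nil, Option.getD_some, List.reverse_reverse]
      rw [pv_erase_mk_cons _ _ _ hnd.1, pv_update_empty rest hnd.2]
    · -- A erases the head key first, then proceeds exactly as on `rest`
      have hA : pvRemoveKeysA ((k, v) :: rest) = k :: pvRemoveKeysA rest := by
        simp [pvRemoveKeysA, hk]
      rw [hA]
      simp only [List.foldl_cons]
      rw [pv_erase_mk_cons _ _ _ hnd.1]
      rw [ih hnd.2]
      -- B: the head entry sits at the very end of the reversed list
      by_cases hm : "least" ∈ rest.map Prod.fst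
      · -- the reverse loop breaks before ever reaching the old head
        have : pvKeptB [] (((k, v) :: rest).reverse) = pvKeptB [] rest.reverse := by
          rw [List.reverse_cons]
          exact pvKeptB_append_of_mem _ _ _ (by simpa using hm)
        rw [this]
      · -- no "least" anywhere: both loops run to completion, both sides are the cleared dict
        have h1 : pvKeptB [] (((k, v) :: rest).reverse) = none := by
          apply pvKeptB_of_not_mem
          simp only [List.reverse_cons, List.map_append, List.map_reverse]
          intro hmem
          rcases List.mem_append.mp hmem with h | h
          · exact hm (List.mem_reverse.mp (by simpa using h))
          · simp at h; exact hk h.symm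
        have h2 : pvKeptB [] rest.reverse = none := by
          apply pvKeptB_of_not_mem
          rw [List.map_reverse, List.mem_reverse]
          exact hm
        rw [h1, h2]

-- ===== VERDICT (by name: the statement is the Claim_ definition above) =====
theorem modify_dict_upto_key_spec : Claim_equal_modify_dict_upto_key := by
  intro my_dict key _
  unfold Spec_modify_dict_upto_key modify_dict_upto_key modify_dict_upto_key_alt
  have hf : (fun (d : PySem.Dict String Int) k =>
      (match d.pop? k with | some (_, d') => d' | none => d)) =
      (fun (d : PySem.Dict String Int) k => d.erase k) := by
    funext d k; exact pv_step_eq_erase d k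
  simp only [hf]
  have hnd : (((PySem.Dict.ofList my_dict : PySem.Dict String Int).items).map Prod.fst).Nodup :=
    PySem.Dict.nodup_keys_ofList my_dict
  exact pv_main (PySem.Dict.ofList my_dict).items hnd
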